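-- pv_equiv track=rewrite | github.com/RashbirSingh/RecruitmentDataPreprocessing | bulletFilter.py | otherCleaning
-- ===== SOURCE A (Python) =====
-- def otherCleaning(sectionalDic,
--                   textList=["apply now", "www", "apply online", "apply today", "click below", "below", "CV"]):
--
--     for key, val in sectionalDic.items():
--         valulist = list()
--         found = False
--         for eachVal in range(len(val)):
--             for eachSearchWord in textList:
--                 if eachSearchWord.lower() in val[eachVal].lower():
--                     found = True
--             if found == False:
--                 valulist.append(val[eachVal])
--         sectionalDic[key] = valulist
--     return sectionalDic
-- ===== SOURCE B (Python) =====
-- def otherCleaning(sectionalDic,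
--                   textList=["apply now", "www", "apply online", "apply today", "click below", "below", "CV"]):
--     lowered = [w.lower() for w in textList]
--     for key, val in sectionalDic.items():
--         cut = next((i for i, elem in enumerate(val)
--                     if any(w in elem.lower() for w in lowered)),
--                    len(val))
--         sectionalDic[key] = val[:cut]
--     return sectionalDic
-- ===== Notes on version B (the rewrite author's own statement) =====
-- stated objective: idiomatic
-- what changed: Replaces A's sticky 'found' flag and element-accumulating filter loop by a two-stage decomposition: lower-case the search words once, locate the cut index of the first offending element with next(enumerate(...)) defaulting to len(val), and assign the slice val[:cut].
import Mathlib
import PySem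

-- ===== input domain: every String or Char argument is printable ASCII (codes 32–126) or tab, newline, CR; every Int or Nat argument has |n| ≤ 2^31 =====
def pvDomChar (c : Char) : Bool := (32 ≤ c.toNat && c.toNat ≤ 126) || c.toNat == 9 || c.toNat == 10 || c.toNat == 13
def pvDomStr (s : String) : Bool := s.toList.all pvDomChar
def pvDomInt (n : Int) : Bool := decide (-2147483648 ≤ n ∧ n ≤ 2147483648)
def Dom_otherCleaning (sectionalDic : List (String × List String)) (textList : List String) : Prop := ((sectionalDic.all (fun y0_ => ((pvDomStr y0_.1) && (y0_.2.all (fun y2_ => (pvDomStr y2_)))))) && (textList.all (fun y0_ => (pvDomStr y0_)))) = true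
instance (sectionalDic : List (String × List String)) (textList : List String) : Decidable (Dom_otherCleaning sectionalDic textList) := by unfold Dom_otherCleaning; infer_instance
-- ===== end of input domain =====

-- B precomputes lowered search words once and, per key, locates the cut index of the first matching element (enumerate/next with default len) and slices val[:cut], instead of A's sticky-flag filter loop (idiomatic); both mutate sectionalDic the same way, equivalence here is about the return value.


-- ===== PORT A =====
def otherCleaning (sectionalDic : List (String × List String)) (textList : List String) : List (String × List String) :=
  sectionalDic.foldl (fun acc kv =>
    let st := (PySem.List.pyRange 0 (PySem.List.len kv.2) 1).foldl
      (fun (st : List String × Bool) eachVal =>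
        let elem := PySem.List.pyGetD kv.2 eachVal ""
        let found := textList.foldl (fun f eachSearchWord =>
          if PySem.Str.isIn (PySem.Str.lower eachSearchWord) (PySem.Str.lower elem) then true else f) st.2
        (if found = false then st.1 ++ [elem] else st.1, found))
      ([], false)
    acc ++ [(kv.1, st.1)]) []

-- ===== PORT B =====
-- next((i for i, elem in enumerate(val) if any(w in elem.lower() for w in lowered)), dflt)
def pvNextCut (pairs : List (Int × String)) (lowered : List String) (dflt : Int) : Int :=
  match pairs with
  | [] => dflt
  | (i, elem) :: rest =>
    if lowered.any (fun w => PySem.Str.isIn w (PySem.Str.lower elem)) then i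
    else pvNextCut rest lowered dflt

def otherCleaning_alt (sectionalDic : List (String × List String)) (textList : List String) : List (String × List String) :=
  let lowered := textList.map PySem.Str.lower
  sectionalDic.map (fun kv =>
    let cut := pvNextCut (PySem.List.enumerate kv.2 0) lowered (PySem.List.len kv.2)
    (kv.1, PySem.List.slice kv.2 none (some cut)))

-- ===== PRECONDITION & SPEC =====
def Spec_otherCleaning (sectionalDic : List (String × List String)) (textList : List String) (out : List (String × List String)) : Prop := out = otherCleaning_alt sectionalDic textList
instance (sectionalDic : List (String × List String)) (textList : List String) (out : List (String × List String)) : Decidable (Spec_otherCleaning sectionalDic textList out) := by unfold Spec_otherCleaning; infer_instance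

-- ===== CLAIM (what is proved, stated in full; the proofs are below) =====
def Claim_equal_otherCleaning : Prop := ∀ (sectionalDic : List (String × List String)) (textList : List String), Dom_otherCleaning sectionalDic textList → Spec_otherCleaning sectionalDic textList (otherCleaning sectionalDic textList)

-- ===== LEMMAS AND PROOFS =====

-- A's inner word loop is st.2 OR "some word satisfies p"
theorem pv_wordLoop (p : String → Bool) (textList : List String) (b : Bool) :
    textList.foldl (fun f w => if p w then true else f) b
    = (b || textList.any p) := by
  induction textList generalizing b with
  | nil => simp
  | cons w ws ih =>
    simp only [List.foldl_cons, List.any_cons]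
    by_cases h : p w = true
    · rw [if_pos h, ih]; simp [h]
    · rw [if_neg h, ih]; simp [h]

-- A's sticky-flag element loop computes init ++ takeWhile (!q)
theorem pv_flagLoop (q : String → Bool) (v : List String) (init : List String) (b : Bool) :
    (v.foldl
      (fun (st : List String × Bool) elem =>
        let found := st.2 || q elem
        (if found = false then st.1 ++ [elem] else st.1, found))
      (init, b)).1
    = init ++ (if b then [] else v.takeWhile (fun elem => !q elem)) := by
  induction v generalizing init b with
  | nil => cases b <;> simp
  | cons e v ih =>
    cases b with
    | true =>
      rw [List.foldl_cons]
      exact (ih init true).trans (by simp)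
    | false =>
      by_cases h : q e = true
      · rw [List.foldl_cons,
          show (let found := ((init, false) : List String × Bool).2 || q e
            (if found = false then (init, false).1 ++ [e] else (init, false).1, found))
            = ((init, true) : List String × Bool) from by simp [h]]
        exact (ih init true).trans (by simp [h])
      · simp only [Bool.not_eq_true] at h
        rw [List.foldl_cons,
          show (let found := ((init, false) : List String × Bool).2 || q e
            (if found = false then (init, false).1 ++ [e] else (init, false).1, found))
            = ((init ++ [e], false) : List String × Bool) from by simp [h],
          ih]
        simp [h]

-- takeWhile of the negation is take up to the first index where q holds
theorem pv_takeWhile_eq_take_findIdx (q : String → Bool) (v : List String) :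
    v.takeWhile (fun e => !q e) = v.take (v.findIdx q) := by
  induction v with
  | nil => simp
  | cons e v ih => by_cases h : q e <;> simp [List.findIdx_cons, h, ih]

-- B's next(...) over enumerate is s + findIdx when a match exists, else the default
theorem pv_nextCut_enumerate (v : List String) (lowered : List String) (s dflt : Int) :
    pvNextCut (PySem.List.enumerate v s) lowered dflt
    = (if v.findIdx (fun e => lowered.any (fun w => PySem.Str.isIn w (PySem.Str.lower e))) < v.length
       then s + v.findIdx (fun e => lowered.any (fun w => PySem.Str.isIn w (PySem.Str.lower e)))
       else dflt) := by
  induction v generalizing s with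
  | nil => simp [PySem.List.enumerate_nil, pvNextCut]
  | cons e v ih =>
    rw [PySem.List.enumerate_cons]
    by_cases h : (lowered.any (fun w => PySem.Str.isIn w (PySem.Str.lower e))) = true
    · simp only [pvNextCut, List.findIdx_cons, h, cond_true, List.length_cons]
      simp
    · rw [Bool.not_eq_true] at h
      simp only [pvNextCut, List.findIdx_cons, h, cond_false, List.length_cons]
      rw [if_neg (by simp), ih]
      have hle := List.findIdx_le_length (p := fun e => lowered.any (fun w => PySem.Str.isIn w (PySem.Str.lower e))) (xs := v)
      split_ifs with h1 h2 h3 <;> [skip; omega; omega; rfl]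
      push_cast; ring

-- ===== VERDICT (by name: the statement is the Claim_ definition above) =====
theorem otherCleaning_spec : Claim_equal_otherCleaning := by
  intro sectionalDic textList _
  unfold Spec_otherCleaning otherCleaning otherCleaning_alt
  rw [PySem.List.foldl_append_singleton_eq_map]
  apply List.map_congr_left
  intro kv _
  congr 1
  have hr := PySem.List.foldl_pyRange_zero_pyGetD kv.2 ""
    (fun (st : List String × Bool) elem =>
      let found := textList.foldl (fun f eachSearchWord =>
        if PySem.Str.isIn (PySem.Str.lower eachSearchWord) (PySem.Str.lower elem) then true else f) st.2
      (if found = false then st.1 ++ [elem] else st.1, found))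
    ([], false)
  have hf : (fun (st : List String × Bool) elem =>
      let found := textList.foldl (fun f eachSearchWord =>
        if PySem.Str.isIn (PySem.Str.lower eachSearchWord) (PySem.Str.lower elem) then true else f) st.2
      (if found = false then st.1 ++ [elem] else st.1, found))
    = (fun (st : List String × Bool) elem =>
      let found := st.2 || textList.any (fun w => PySem.Str.isIn (PySem.Str.lower w) (PySem.Str.lower elem))
      (if found = false then st.1 ++ [elem] else st.1, found)) := by
    funext st elem
    simp only [pv_wordLoop]
  rw [hf] at hr
  refine (congrArg Prod.fst hr).trans ?_
  rw [pv_flagLoop]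
  simp only [List.nil_append, if_neg Bool.false_ne_true]
  -- same predicate whether words are lowered up front or per element
  have hq : (fun e => (textList.map PySem.Str.lower).any (fun w => PySem.Str.isIn w (PySem.Str.lower e)))
      = (fun e => textList.any (fun w => PySem.Str.isIn (PySem.Str.lower w) (PySem.Str.lower e))) := by
    funext e; rw [List.any_map]; rfl
  rw [pv_nextCut_enumerate, hq]
  have hle := List.findIdx_le_length (p := fun e => textList.any (fun w => PySem.Str.isIn (PySem.Str.lower w) (PySem.Str.lower e))) (xs := kv.2)
  by_cases h : kv.2.findIdx (fun e => textList.any (fun w => PySem.Str.isIn (PySem.Str.lower w) (PySem.Str.lower e))) < kv.2.length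
  · rw [if_pos h, zero_add, PySem.List.slice_to kv.2 (Int.natCast_nonneg _), Int.toNat_natCast,
      pv_takeWhile_eq_take_findIdx]
  · rw [if_neg h, pv_takeWhile_eq_take_findIdx]
    have hfi : kv.2.findIdx (fun e => textList.any (fun w => PySem.Str.isIn (PySem.Str.lower w) (PySem.Str.lower e))) = kv.2.length := by omega
    rw [hfi, PySem.List.len_eq, PySem.List.slice_to kv.2 (Int.natCast_nonneg _), Int.toNat_natCast]
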